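-- pv_equiv track=rewrite | github.com/CK12/ck12-webhelpers | branches/dev/python-223/flx/pylons/ads/flx/engine/repository.py | _walkGraph
-- ===== SOURCE A (Python) =====
-- def _walkGraph(graph, ancestors, node):
--     """Computes all possible (ancestor, descendant) pairs starting at a node.
--
--     Arguments:
--     graph     -- parent ID to immediate child ID mapping
--     ancestors -- list of ancestors visited
--     node      -- the node where traversing commences
--     """
--     pairs = {}
--     if node in ancestors:
--         return pairs
--     pairs[(node, node)] = True
--     for i in graph.get(node, []):
--         pairs[(node, i)] = True
--         for a in ancestors:
--             pairs[(a, i)] = True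
--         pairs.update(_walkGraph(graph, ancestors + [node], i))
--     return pairs
-- ===== SOURCE B (Python) =====
-- def _walkGraph(graph, ancestors, node):
--     """Iterative re-implementation: an explicit task stack emits the
--     (ancestor, descendant) pair sequence in A's preorder, and one dict
--     comprehension dedups it (first occurrence wins)."""
--     emitted = []
--     stack = [("visit", node, ancestors)]
--     while stack:
--         task = stack.pop()
--         if task[0] == "visit":
--             _, n, anc = task
--             if n in anc:
--                 continue
--             emitted.append((n, n))
--             for i in reversed(graph.get(n, [])):
--                 stack.append(("visit", i, anc + [n]))
--                 stack.append(("edge", n, i, anc))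
--         else:
--             _, n, i, anc = task
--             emitted.append((n, i))
--             emitted.extend((a, i) for a in anc)
--     return {p: True for p in emitted}
-- ===== Notes on version B (the rewrite author's own statement) =====
-- stated objective: alternative
-- what changed: A's recursive dict-mutating traversal is replaced by an iterative explicit task stack that emits the (ancestor, descendant) pair sequence in the same preorder, deduplicated once by a single dict comprehension at the end.
import Mathlib
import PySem

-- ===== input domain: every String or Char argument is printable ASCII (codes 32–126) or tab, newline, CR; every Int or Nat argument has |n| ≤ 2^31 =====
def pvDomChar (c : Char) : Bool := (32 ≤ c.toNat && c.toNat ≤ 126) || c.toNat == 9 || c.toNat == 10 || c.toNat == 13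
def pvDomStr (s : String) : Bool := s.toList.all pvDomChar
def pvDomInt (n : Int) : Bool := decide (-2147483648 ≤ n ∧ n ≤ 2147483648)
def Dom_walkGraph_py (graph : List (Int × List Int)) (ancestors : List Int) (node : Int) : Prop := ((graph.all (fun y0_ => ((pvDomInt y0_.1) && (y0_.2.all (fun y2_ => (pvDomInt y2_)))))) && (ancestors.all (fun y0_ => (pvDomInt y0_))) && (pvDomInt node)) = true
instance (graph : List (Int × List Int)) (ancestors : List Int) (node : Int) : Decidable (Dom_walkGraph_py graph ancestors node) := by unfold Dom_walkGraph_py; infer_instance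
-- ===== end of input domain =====

-- B replaces A's recursion with an explicit task stack that emits the pair
-- sequence in the same preorder and dedups it once with a dict comprehension
-- (objective: alternative decomposition, same cost).
-- Recursions are written structurally on a fuel argument that provably never
-- runs out (a totality guard only); the measure is the number of distinct
-- graph keys not yet among the ancestors.

-- ===== PORT A =====
-- fuel bound: number of distinct graph keys not yet in `ancestors`
def pvRank (graph : List (Int × List Int)) (anc : List Int) : Nat :=
  ((graph.map Prod.fst).dedup).countP (fun k => !anc.contains k)

-- A's recursion, structurally on fuel (fuel > pvRank never runs out)
def pvWalkA (graph : List (Int × List Int)) : Nat → List Int → Int → PySem.Dict (Int × Int) Bool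
  | 0, _, _ => PySem.Dict.empty
  | fuel + 1, ancestors, node =>
    if ancestors.contains node then PySem.Dict.empty
    else
      ((PySem.Dict.mk graph).getD node []).foldl
        (fun pairs i =>
          ((ancestors.foldl (fun p a => p.insert (a, i) true)
              (pairs.insert (node, i) true)).update
            (pvWalkA graph fuel (ancestors ++ [node]) i).items))
        (PySem.Dict.empty.insert (node, node) true)

def walkGraph_py (graph : List (Int × List Int)) (ancestors : List Int) (node : Int) :
    List (Int × Int × Bool) :=
  (pvWalkA graph (pvRank graph ancestors + 1) ancestors node).items.map
    (fun p => (p.1.1, p.1.2, p.2))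

-- ===== PORT B =====
-- stack frames of B's while loop ("visit" / "edge" tasks)
inductive PVTask where
  | visit : Int → List Int → PVTask
  | edge : Int → Int → List Int → PVTask
deriving DecidableEq, Repr

-- fuel bound for the stack loop: size of a visit's emission tree
def pvVisitW (graph : List (Int × List Int)) : Nat → List Int → Int → Nat
  | 0, _, _ => 1
  | fuel + 1, anc, n =>
    if anc.contains n then 1
    else 2 + (((PySem.Dict.mk graph).getD n []).map
      (fun i => 1 + pvVisitW graph fuel (anc ++ [n]) i)).sum

def pvTaskW (graph : List (Int × List Int)) : PVTask → Nat
  | .visit n anc => pvVisitW graph (pvRank graph anc + 1) anc n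
  | .edge _ _ _ => 1

-- B's while loop, structurally on fuel (fuel > total task weight never runs out)
def runB (graph : List (Int × List Int)) : Nat → List PVTask → List (Int × Int) → List (Int × Int)
  | 0, _, emitted => emitted
  | _ + 1, [], emitted => emitted
  | fuel + 1, .visit n anc :: rest, emitted =>
    if anc.contains n then runB graph fuel rest emitted
    else runB graph fuel
      (((PySem.Dict.mk graph).getD n []).reverse.foldl
        (fun st i => .edge n i anc :: .visit i (anc ++ [n]) :: st) rest)
      (emitted ++ [(n, n)])
  | fuel + 1, .edge n i anc :: rest, emitted =>
    runB graph fuel rest (emitted ++ (n, i) :: anc.map (fun a => (a, i)))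

def walkGraph_py_alt (graph : List (Int × List Int)) (ancestors : List Int) (node : Int) :
    List (Int × Int × Bool) :=
  ((runB graph (pvTaskW graph (.visit node ancestors) + 1) [.visit node ancestors] []).foldl
      (fun d p => d.insert p true) (PySem.Dict.empty : PySem.Dict (Int × Int) Bool)).items.map
    (fun p => (p.1.1, p.1.2, p.2))

-- ===== PRECONDITION & SPEC =====
def Spec_walkGraph_py (graph : List (Int × List Int)) (ancestors : List Int) (node : Int) (out : List (Int × Int × Bool)) : Prop := out = walkGraph_py_alt graph ancestors node
instance (graph : List (Int × List Int)) (ancestors : List Int) (node : Int) (out : List (Int × Int × Bool)) : Decidable (Spec_walkGraph_py graph ancestors node out) := by unfold Spec_walkGraph_py; infer_instance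

-- ===== CLAIM (what is proved, stated in full; the proofs are below) =====
def Claim_equal_walkGraph_py : Prop := ∀ (graph : List (Int × List Int)) (ancestors : List Int) (node : Int), Dom_walkGraph_py graph ancestors node → Spec_walkGraph_py graph ancestors node (walkGraph_py graph ancestors node)

-- ===== LEMMAS AND PROOFS =====

theorem pvRank_lt (graph : List (Int × List Int)) (anc : List Int) (node : Int)
    (hk : node ∈ graph.map Prod.fst) (hn : anc.contains node = false) :
    pvRank graph (anc ++ [node]) < pvRank graph anc := by
  have hmem : node ∈ (List.map Prod.fst graph).dedup := List.mem_dedup.mpr hk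
  obtain ⟨s, t, hst⟩ := List.append_of_mem hmem
  have hmono : ∀ (l : List Int),
      l.countP (fun k => !(anc ++ [node]).contains k) ≤ l.countP (fun k => !anc.contains k) := by
    intro l
    apply List.countP_mono_left
    intro x _ hx
    simp only [List.contains_append, Bool.not_eq_eq_eq_not, Bool.not_true,
      Bool.or_eq_false_iff] at hx ⊢
    exact hx.1
  have h1 := hmono s
  have h2 := hmono t
  have hq : (!anc.contains node) = true := by rw [hn]; rfl
  have hq' : (!(anc ++ [node]).contains node) = false := by simp
  unfold pvRank
  rw [hst]
  simp only [List.countP_append, List.countP_cons, hq, hq', reduceIte,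
    Bool.false_eq_true, if_false]
  omega

theorem pvMem_key (graph : List (Int × List Int)) (n i : Int)
    (hi : i ∈ (PySem.Dict.mk graph).getD n []) : n ∈ graph.map Prod.fst := by
  induction graph with
  | nil =>
    rw [PySem.Dict.getD, show (PySem.Dict.mk ([] : List (Int × List Int))).get? n = none from rfl] at hi
    simp at hi
  | cons p rest ih =>
    rw [PySem.Dict.getD, PySem.Dict.get?_mk_cons] at hi
    by_cases h : p.1 == n
    · exact List.mem_map.mpr ⟨p, List.mem_cons_self, eq_of_beq h⟩
    · rw [if_neg (by simp_all)] at hi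
      simp only [List.map_cons, List.mem_cons]
      exact Or.inr (ih (by rwa [PySem.Dict.getD]))

-- a child's rank is strictly smaller (the node visited has children, so it is a key)
theorem pvRank_child_lt (graph : List (Int × List Int)) (anc : List Int) (n i : Int)
    (hi : i ∈ (PySem.Dict.mk graph).getD n []) (h : ¬ anc.contains n = true) :
    pvRank graph (anc ++ [n]) < pvRank graph anc :=
  pvRank_lt graph anc n (pvMem_key graph n i hi) (Bool.eq_false_iff.mpr h)

-- the raw (duplicated) pair sequence A's preorder traversal emits, fueled
def pvE (graph : List (Int × List Int)) : Nat → List Int → Int → List (Int × Int)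
  | 0, _, _ => []
  | fuel + 1, anc, n =>
    if anc.contains n then []
    else (n, n) :: ((PySem.Dict.mk graph).getD n []).flatMap
      (fun i => (n, i) :: (anc.map (fun a => (a, i)) ++ pvE graph fuel (anc ++ [n]) i))

theorem pvE_congr (graph : List (Int × List Int)) :
    ∀ (f1 f2 : Nat) (anc : List Int) (n : Int), pvRank graph anc < f1 → pvRank graph anc < f2 →
      pvE graph f1 anc n = pvE graph f2 anc n := by
  intro f1
  induction f1 with
  | zero => intro f2 anc n h1 _; omega
  | succ f1 ih =>
    intro f2 anc n _ h2
    match f2, h2 with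
    | f2 + 1, h2 =>
      rw [pvE, pvE]
      by_cases h : anc.contains n
      · rw [if_pos h, if_pos h]
      · rw [if_neg h, if_neg h]
        congr 1
        apply List.flatMap_congr
        intro i hi
        have hlt := pvRank_child_lt graph anc n i hi h
        rw [ih f2 (anc ++ [n]) i (by omega) (by omega)]

-- the emission list of a full visit of n from ancestors anc
def pvESpec (graph : List (Int × List Int)) (anc : List Int) (n : Int) : List (Int × Int) :=
  pvE graph (pvRank graph anc + 1) anc n

theorem pvVisitW_congr (graph : List (Int × List Int)) :
    ∀ (f1 f2 : Nat) (anc : List Int) (n : Int), pvRank graph anc < f1 → pvRank graph anc < f2 →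
      pvVisitW graph f1 anc n = pvVisitW graph f2 anc n := by
  intro f1
  induction f1 with
  | zero => intro f2 anc n h1 _; omega
  | succ f1 ih =>
    intro f2 anc n _ h2
    match f2, h2 with
    | f2 + 1, h2 =>
      rw [pvVisitW, pvVisitW]
      by_cases h : anc.contains n
      · rw [if_pos h, if_pos h]
      · rw [if_neg h, if_neg h]
        congr 2
        apply List.map_congr_left
        intro i hi
        have hlt := pvRank_child_lt graph anc n i hi h
        rw [ih f2 (anc ++ [n]) i (by omega) (by omega)]

def pvIns (d : PySem.Dict (Int × Int) Bool) (L : List (Int × Int)) : PySem.Dict (Int × Int) Bool :=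
  L.foldl (fun d p => d.insert p true) d

def pvAllTrue (d : PySem.Dict (Int × Int) Bool) : Prop := ∀ q ∈ d.items, q.2 = true

theorem pvIns_append (d : PySem.Dict (Int × Int) Bool) (L1 L2 : List (Int × Int)) :
    pvIns d (L1 ++ L2) = pvIns (pvIns d L1) L2 := List.foldl_append

theorem pvIns_cons (d : PySem.Dict (Int × Int) Bool) (p : Int × Int) (L : List (Int × Int)) :
    pvIns d (p :: L) = pvIns (d.insert p true) L := rfl

theorem pvAllTrue_empty : pvAllTrue PySem.Dict.empty := by
  intro q hq
  simp [PySem.Dict.empty] at hq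

theorem pvAllTrue_insert {d : PySem.Dict (Int × Int) Bool} (h : pvAllTrue d) (p : Int × Int) :
    pvAllTrue (d.insert p true) := by
  intro q hq
  rw [PySem.Dict.mem_items_insert] at hq
  rcases hq with rfl | ⟨hq, _⟩
  · rfl
  · exact h q hq

theorem pvAllTrue_pvIns {d : PySem.Dict (Int × Int) Bool} (h : pvAllTrue d)
    (L : List (Int × Int)) : pvAllTrue (pvIns d L) := by
  induction L generalizing d with
  | nil => exact h
  | cons p L ih => exact ih (pvAllTrue_insert h p)

theorem pvInsert_true_self {d : PySem.Dict (Int × Int) Bool} (hT : pvAllTrue d)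
    {p : Int × Int} (hc : d.contains p = true) : d.insert p true = d := by
  unfold PySem.Dict.insert
  rw [if_pos hc]
  cases d with
  | mk items =>
    congr 1
    have : items.map (fun q => if q.1 == p then ((p, true) : (Int × Int) × Bool) else q)
        = items.map id := by
      apply List.map_congr_left
      intro q hq
      by_cases hb : q.1 == p
      · have h1 : q.1 = p := eq_of_beq hb
        have h2 : q.2 = true := hT q hq
        simp [← h1, ← h2]
      · simp [hb]
    rw [this, List.map_id]

theorem pvContains_pvIns_of_contains {d : PySem.Dict (Int × Int) Bool} {p : Int × Int}
    (h : d.contains p = true) (L : List (Int × Int)) : (pvIns d L).contains p = true := by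
  induction L generalizing d with
  | nil => exact h
  | cons q L ih =>
    rw [pvIns_cons]
    exact ih (by rw [PySem.Dict.contains_insert, h]; simp)

theorem pvContains_pvIns_of_mem {p : Int × Int} {L : List (Int × Int)} (h : p ∈ L)
    (d : PySem.Dict (Int × Int) Bool) : (pvIns d L).contains p = true := by
  induction L generalizing d with
  | nil => simp at h
  | cons q L ih =>
    rw [pvIns_cons]
    rcases List.mem_cons.mp h with rfl | h'
    · exact pvContains_pvIns_of_contains (PySem.Dict.contains_insert_self d p true) L
    · exact ih h' _

theorem pvMem_of_contains_pvIns_empty {p : Int × Int} {L : List (Int × Int)}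
    (h : (pvIns PySem.Dict.empty L).contains p = true) : p ∈ L := by
  have hkeys : (pvIns PySem.Dict.empty L).keys = PySem.Set.ofList L := by
    show (List.foldl (fun d x => d.insert x ((fun (_ : PySem.Dict (Int × Int) Bool)
        (_ : Int × Int) => true) d x)) PySem.Dict.empty L).keys = _
    rw [PySem.Dict.keys_foldl_insert, PySem.Dict.keys_empty, PySem.Set.update_nil_left]
  have hm := (PySem.Dict.contains_iff_mem_keys _ p).mp h
  rw [hkeys] at hm
  exact (PySem.Set.mem_ofList L p).mp hm

theorem pvUpdate_eq (L : List (Int × Int)) :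
    ∀ (d : PySem.Dict (Int × Int) Bool), pvAllTrue d →
      d.update (pvIns PySem.Dict.empty L).items = pvIns d L := by
  induction L using List.reverseRecOn with
  | nil => intro d _; rfl
  | append_singleton L p ih =>
    intro d hT
    rw [pvIns_append d L [p], pvIns_append PySem.Dict.empty L [p]]
    by_cases hc : (pvIns PySem.Dict.empty L).contains p = true
    · have hmem : p ∈ L := pvMem_of_contains_pvIns_empty hc
      have e1 : pvIns (pvIns PySem.Dict.empty L) [p] = pvIns PySem.Dict.empty L := by
        show (pvIns PySem.Dict.empty L).insert p true = _
        exact pvInsert_true_self (pvAllTrue_pvIns pvAllTrue_empty L) hc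
      have e2 : pvIns (pvIns d L) [p] = pvIns d L := by
        show (pvIns d L).insert p true = _
        exact pvInsert_true_self (pvAllTrue_pvIns hT L) (pvContains_pvIns_of_mem hmem d)
      rw [e1, e2]
      exact ih d hT
    · have hitems : (pvIns (pvIns PySem.Dict.empty L) [p]).items
          = (pvIns PySem.Dict.empty L).items ++ [(p, true)] := by
        show ((pvIns PySem.Dict.empty L).insert p true).items = _
        exact PySem.Dict.items_insert_of_not_contains _ _ (by simpa using hc)
      rw [hitems]
      unfold PySem.Dict.update
      rw [List.foldl_append]
      show ((d.update (pvIns PySem.Dict.empty L).items).insert p true) = _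
      rw [ih d hT]
      rfl

theorem pv_step_fold (anc : List Int) (n : Int)
    (g : Int → PySem.Dict (Int × Int) Bool) (e : Int → List (Int × Int)) :
    ∀ (l : List Int) (d : PySem.Dict (Int × Int) Bool), pvAllTrue d →
      (∀ i ∈ l, g i = pvIns PySem.Dict.empty (e i)) →
      l.foldl (fun pairs i =>
          ((anc.foldl (fun p a => p.insert (a, i) true) (pairs.insert (n, i) true)).update
            (g i).items)) d
        = pvIns d (l.flatMap (fun i => (n, i) :: (anc.map (fun a => (a, i)) ++ e i))) := by
  intro l
  induction l with
  | nil => intro d _ _; rfl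
  | cons i l ih =>
    intro d hT hg
    rw [List.foldl_cons, List.flatMap_cons]
    have step : ((anc.foldl (fun p a => p.insert (a, i) true) (d.insert (n, i) true)).update
          (g i).items)
        = pvIns d ((n, i) :: (anc.map (fun a => (a, i)) ++ e i)) := by
      have hfold : anc.foldl (fun p a => p.insert (a, i) true) (d.insert (n, i) true)
          = pvIns (d.insert (n, i) true) (anc.map (fun a => (a, i))) := by
        unfold pvIns
        rw [List.foldl_map]
      rw [hfold, hg i List.mem_cons_self]
      rw [pvUpdate_eq (e i) _ (pvAllTrue_pvIns (pvAllTrue_insert hT _) _)]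
      rw [pvIns_cons, pvIns_append]
    rw [step]
    rw [ih _ (pvAllTrue_pvIns hT _) (fun j hj => hg j (List.mem_cons_of_mem _ hj))]
    rw [← pvIns_append]

theorem pvA_char (graph : List (Int × List Int)) :
    ∀ (fuel : Nat) (anc : List Int) (n : Int), pvRank graph anc < fuel →
      pvWalkA graph fuel anc n = pvIns PySem.Dict.empty (pvE graph fuel anc n) := by
  intro fuel
  induction fuel with
  | zero => intro anc n h; omega
  | succ fuel ih =>
    intro anc n hf
    rw [pvWalkA, pvE]
    by_cases h : anc.contains n
    · rw [if_pos h, if_pos h]; rfl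
    · rw [if_neg h, if_neg h, pvIns_cons]
      apply pv_step_fold anc n _ _ _ _ (pvAllTrue_insert pvAllTrue_empty _)
      intro i hi
      have hlt := pvRank_child_lt graph anc n i hi h
      exact ih (anc ++ [n]) i (by omega)

-- what each stack task contributes to the emission stream
def pvTaskE (graph : List (Int × List Int)) : PVTask → List (Int × Int)
  | .visit n anc => pvESpec graph anc n
  | .edge n i anc => (n, i) :: anc.map (fun a => (a, i))

-- the reversed-push loop of B builds exactly this stack
theorem pvFoldlPush {α β : Type} (e v : α → β) (l : List α) (st : List β) :
    l.reverse.foldl (fun st i => e i :: v i :: st) st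
      = l.flatMap (fun i => [e i, v i]) ++ st := by
  induction l generalizing st with
  | nil => rfl
  | cons x xs ih =>
    simp only [List.reverse_cons, List.foldl_append, List.foldl_cons, List.foldl_nil,
      List.flatMap_cons, List.append_assoc]
    rw [ih]
    rfl

theorem pvSumPush {α β : Type} (f : β → Nat) (e v : α → β) (l : List α) :
    ((l.flatMap (fun i => [e i, v i])).map f).sum = (l.map (fun i => f (e i) + f (v i))).sum := by
  induction l with
  | nil => rfl
  | cons x xs ih => simp_all; omega

theorem pvFlatMapPush {α β γ : Type} (e v : α → β) (g : β → List γ) (l : List α) :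
    (l.flatMap (fun i => [e i, v i])).flatMap g = l.flatMap (fun i => g (e i) ++ g (v i)) := by
  induction l with
  | nil => rfl
  | cons x xs ih => simp_all

theorem runB_char (graph : List (Int × List Int)) :
    ∀ (fuel : Nat) (stack : List PVTask) (emitted : List (Int × Int)),
      (stack.map (pvTaskW graph)).sum < fuel →
      runB graph fuel stack emitted = emitted ++ stack.flatMap (pvTaskE graph) := by
  intro fuel
  induction fuel with
  | zero => intro stack emitted h; omega
  | succ fuel ih =>
    intro stack emitted hf
    match stack with
    | [] => rw [runB]; simp
    | .visit n anc :: rest =>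
      by_cases h : anc.contains n
      · rw [runB, if_pos h]
        have hw : pvTaskW graph (.visit n anc) = 1 := by
          rw [pvTaskW, pvVisitW, if_pos h]
        rw [ih rest emitted (by
          simp only [List.map_cons, List.sum_cons, hw] at hf
          omega)]
        simp only [List.flatMap_cons, pvTaskE, pvESpec]
        rw [pvE, if_pos h]
        simp
      · -- weight of the visit task, unfolded one step
        have hw : pvTaskW graph (.visit n anc)
            = 2 + (((PySem.Dict.mk graph).getD n []).map
                (fun i => 1 + pvTaskW graph (.visit i (anc ++ [n])))).sum := by
          rw [pvTaskW, pvVisitW, if_neg h]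
          congr 2
          apply List.map_congr_left
          intro i hi
          have hlt := pvRank_child_lt graph anc n i hi h
          rw [pvVisitW_congr graph (pvRank graph anc) (pvRank graph (anc ++ [n]) + 1)
            (anc ++ [n]) i (by omega) (by omega)]
          rfl
        rw [runB, if_neg h, pvFoldlPush]
        have hsum : ((((PySem.Dict.mk graph).getD n []).flatMap
              (fun i => [PVTask.edge n i anc, PVTask.visit i (anc ++ [n])]) ++ rest).map
                (pvTaskW graph)).sum
            = (((PySem.Dict.mk graph).getD n []).map
                (fun i => 1 + pvTaskW graph (.visit i (anc ++ [n])))).sum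
              + (rest.map (pvTaskW graph)).sum := by
          rw [List.map_append, List.sum_append, pvSumPush]
          have hmc : ((PySem.Dict.mk graph).getD n []).map
                (fun i => pvTaskW graph (PVTask.edge n i anc)
                  + pvTaskW graph (PVTask.visit i (anc ++ [n])))
              = ((PySem.Dict.mk graph).getD n []).map
                (fun i => 1 + pvTaskW graph (.visit i (anc ++ [n]))) :=
            List.map_congr_left (fun i _ => by simp [pvTaskW])
          rw [hmc]
        rw [ih _ _ (by
          simp only [List.map_cons, List.sum_cons, hw] at hf
          rw [hsum]
          omega)]
        rw [List.flatMap_append, pvFlatMapPush]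
        simp only [List.flatMap_cons, pvTaskE, pvESpec]
        rw [pvE, if_neg h]
        have hE : ((PySem.Dict.mk graph).getD n []).flatMap
              (fun i => ((n, i) :: anc.map (fun a => (a, i)))
                ++ pvE graph (pvRank graph (anc ++ [n]) + 1) (anc ++ [n]) i)
            = ((PySem.Dict.mk graph).getD n []).flatMap
              (fun i => (n, i) :: (anc.map (fun a => (a, i))
                ++ pvE graph (pvRank graph anc) (anc ++ [n]) i)) := by
          apply List.flatMap_congr
          intro i hi
          have hlt := pvRank_child_lt graph anc n i hi h
          rw [pvE_congr graph (pvRank graph (anc ++ [n]) + 1) (pvRank graph anc)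
            (anc ++ [n]) i (by omega) (by omega)]
          rfl
        rw [hE]
        simp [List.append_assoc]
    | .edge n i anc :: rest =>
      rw [runB]
      rw [ih rest _ (by simp only [List.map_cons, List.sum_cons, pvTaskW] at hf ⊢; omega)]
      simp only [List.flatMap_cons, pvTaskE]
      simp [List.append_assoc]

-- ===== VERDICT (by name: the statement is the Claim_ definition above) =====
theorem walkGraph_py_spec : Claim_equal_walkGraph_py := by
  intro graph ancestors node _
  unfold Spec_walkGraph_py walkGraph_py walkGraph_py_alt
  rw [runB_char graph (pvTaskW graph (.visit node ancestors) + 1) [.visit node ancestors] []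
    (by simp)]
  simp only [List.flatMap_cons, List.flatMap_nil, List.append_nil, List.nil_append,
    pvTaskE, pvESpec]
  rw [pvA_char graph (pvRank graph ancestors + 1) ancestors node (by omega)]
  rfl
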